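-- pv_equiv track=rewrite | github.com/Qliangw/notion_sync_data | sync_data/data/user_config.py | get_desensitization_of_user_info
-- ===== SOURCE A (Python) =====
-- def get_desensitization_of_user_info(user_info):
--     x_user_info = ''
--     user_len = len(user_info)
--     for i in range(user_len):
--         if user_len / 2 - user_len / 4 < i < user_len / 2 + user_len / 4:
--             x_user_info += "*"
--         else:
--             x_user_info += user_info[i]
--     return x_user_info
-- ===== SOURCE B (Python) =====
-- def get_desensitization_of_user_info(user_info):
--     n = len(user_info)
--     start = n // 4 + 1
--     stop = (3 * n + 3) // 4
--     return user_info[:start] + "*" * (stop - start) + user_info[stop:]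
-- ===== Notes on version B (the rewrite author's own statement) =====
-- stated objective: simpler
-- what changed: Replaces the per-index loop with a float comparison and string concatenation per character by a closed-form computation of the masked index range (start = n//4+1, stop = ceil(3n/4)) and three slices.
import Mathlib
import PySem

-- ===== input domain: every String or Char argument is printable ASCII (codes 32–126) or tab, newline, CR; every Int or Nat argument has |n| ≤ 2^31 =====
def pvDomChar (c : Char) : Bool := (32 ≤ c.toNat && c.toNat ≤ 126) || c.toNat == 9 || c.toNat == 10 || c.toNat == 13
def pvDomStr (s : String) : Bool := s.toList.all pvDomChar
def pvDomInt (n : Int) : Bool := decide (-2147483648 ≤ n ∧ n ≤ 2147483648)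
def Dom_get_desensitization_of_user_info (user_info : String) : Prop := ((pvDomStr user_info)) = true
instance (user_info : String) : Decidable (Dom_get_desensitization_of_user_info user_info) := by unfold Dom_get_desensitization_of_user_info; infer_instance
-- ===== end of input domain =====

-- B replaces the per-index loop testing a float condition by a closed-form masked range and three slices; objective: simpler.

-- ===== PORT A =====
-- Python's float divisions n/2, n/4 and their sum/difference are exact binary floats for
-- |n| ≤ 2^31, so porting them as exact rational arithmetic is exact on Dom.
def get_desensitization_of_user_info (user_info : String) : String :=
  let cs := user_info.toList
  let user_len := cs.length
  ((List.range user_len).foldl (fun (acc : List Char) (i : ℕ) =>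
      if (user_len : ℚ) / 2 - (user_len : ℚ) / 4 < (i : ℚ) ∧ (i : ℚ) < (user_len : ℚ) / 2 + (user_len : ℚ) / 4
      then acc ++ ['*']
      else acc ++ [cs.getD i ' ']) []) |> String.ofList

-- ===== PORT B =====
-- slices user_info[:start] / user_info[stop:] with nonnegative indices are exactly take/drop;
-- "*" * (stop - start) with a possibly negative count is exactly List.replicate under Nat subtraction.
def get_desensitization_of_user_info_alt (user_info : String) : String :=
  let cs := user_info.toList
  let n := cs.length
  let start := n / 4 + 1
  let stop := (3 * n + 3) / 4
  (cs.take start ++ List.replicate (stop - start) '*' ++ cs.drop stop) |> String.ofList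

-- ===== PRECONDITION & SPEC =====
def Spec_get_desensitization_of_user_info (user_info : String) (out : String) : Prop := out = get_desensitization_of_user_info_alt user_info
instance (user_info : String) (out : String) : Decidable (Spec_get_desensitization_of_user_info user_info out) := by unfold Spec_get_desensitization_of_user_info; infer_instance

-- ===== CLAIM (what is proved, stated in full; the proofs are below) =====
def Claim_equal_get_desensitization_of_user_info : Prop := ∀ (user_info : String), Dom_get_desensitization_of_user_info user_info → Spec_get_desensitization_of_user_info user_info (get_desensitization_of_user_info user_info)

-- ===== LEMMAS AND PROOFS =====

-- the per-character body of A, as a single character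
def pvMaskChar (cs : List Char) (i : ℕ) : Char :=
  if cs.length < 4 * i ∧ 4 * i < 3 * cs.length then '*' else cs.getD i ' '

theorem pvCond_iff (n i : ℕ) :
    ((n : ℚ) / 2 - (n : ℚ) / 4 < (i : ℚ) ∧ (i : ℚ) < (n : ℚ) / 2 + (n : ℚ) / 4) ↔
      (n < 4 * i ∧ 4 * i < 3 * n) := by
  have h1 : (n : ℚ) / 2 - (n : ℚ) / 4 = (n : ℚ) / 4 := by ring
  have h2 : (n : ℚ) / 2 + (n : ℚ) / 4 = (3 * n : ℚ) / 4 := by ring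
  rw [h1, h2, div_lt_iff₀ (by norm_num : (0:ℚ) < 4), lt_div_iff₀ (by norm_num : (0:ℚ) < 4)]
  constructor
  · rintro ⟨ha, hb⟩
    exact ⟨by exact_mod_cast (by linarith : (n:ℚ) < 4 * i), by exact_mod_cast (by linarith : (4 * i : ℚ) < 3 * n)⟩
  · rintro ⟨ha, hb⟩
    have ha' : (n:ℚ) < 4 * i := by exact_mod_cast ha
    have hb' : (4 * i : ℚ) < 3 * n := by exact_mod_cast hb
    exact ⟨by linarith, by linarith⟩

theorem pvFoldl_append (cs : List Char) (l : List ℕ) (acc : List Char) :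
    l.foldl (fun (acc : List Char) (i : ℕ) =>
      if (cs.length : ℚ) / 2 - (cs.length : ℚ) / 4 < (i : ℚ) ∧ (i : ℚ) < (cs.length : ℚ) / 2 + (cs.length : ℚ) / 4
      then acc ++ ['*'] else acc ++ [cs.getD i ' ']) acc = acc ++ l.map (pvMaskChar cs) := by
  induction l generalizing acc with
  | nil => simp
  | cons x xs ih =>
    simp only [List.foldl_cons, List.map_cons]
    rw [ih]
    by_cases h : (cs.length < 4 * x ∧ 4 * x < 3 * cs.length)
    · rw [if_pos ((pvCond_iff cs.length x).mpr h)]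
      simp [pvMaskChar, if_pos h]
    · rw [if_neg (fun hc => h ((pvCond_iff cs.length x).mp hc))]
      simp [pvMaskChar, if_neg h]

theorem pvMain (cs : List Char) :
    (List.range cs.length).map (pvMaskChar cs) =
      cs.take (cs.length / 4 + 1) ++ List.replicate ((3 * cs.length + 3) / 4 - (cs.length / 4 + 1)) '*'
        ++ cs.drop ((3 * cs.length + 3) / 4) := by
  set n := cs.length with hn
  set start := n / 4 + 1 with hstart
  set stop := (3 * n + 3) / 4 with hstop
  apply List.ext_getElem
  · simp only [List.length_map, List.length_range, List.length_append, List.length_take,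
      List.length_replicate, List.length_drop, ← hn]
    omega
  · intro i h1 h2
    simp only [List.getElem_map, List.getElem_range]
    unfold pvMaskChar
    simp only [List.length_map, List.length_range] at h1
    by_cases hi1 : i < start
    · rw [List.getElem_append_left (by simp only [List.length_append, List.length_take, List.length_replicate]; omega),
        List.getElem_append_left (by simp only [List.length_take]; omega),
        List.getElem_take]
      rw [if_neg (by omega : ¬ (n < 4 * i ∧ 4 * i < 3 * n))]
      exact List.getD_eq_getElem cs ' ' h1
    · by_cases hi2 : i < stop
      · rw [List.getElem_append_left (by simp only [List.length_append, List.length_take, List.length_replicate]; omega),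
          List.getElem_append_right (by simp only [List.length_take]; omega),
          List.getElem_replicate]
        rw [if_pos (by omega : (n < 4 * i ∧ 4 * i < 3 * n))]
      · rw [List.getElem_append_right (by simp only [List.length_append, List.length_take, List.length_replicate]; omega)]
        rw [List.getElem_drop]
        rw [if_neg (by omega : ¬ (n < 4 * i ∧ 4 * i < 3 * n))]
        rw [List.getD_eq_getElem cs ' ' h1]
        congr 1
        simp only [List.length_append, List.length_take, List.length_replicate]
        omega

-- ===== VERDICT (by name: the statement is the Claim_ definition above) =====
theorem get_desensitization_of_user_info_spec : Claim_equal_get_desensitization_of_user_info := by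
  intro user_info _
  unfold Spec_get_desensitization_of_user_info get_desensitization_of_user_info get_desensitization_of_user_info_alt
  simp only []
  rw [pvFoldl_append user_info.toList (List.range user_info.toList.length) []]
  rw [List.nil_append, pvMain]
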